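-- pv_equiv track=rewrite | github.com/vlsevt/Python_Exercises | EXAM/exam8/exam.py | find_sum_pairs
-- ===== SOURCE A (Python) =====
-- def find_sum_pairs(lst: list, target: int) -> list:
--     """
--     Find 2 digits in list that sum up to target.
--
--     Given a list of digits, you have to search through list and find
--     minimal and maximal digits that sum up to target.
--
--     find_sum_pairs([1, 2, 3, 4, 5], 6) => [1, 5], answer [2, 4] is not accepted
--     find_sum_pairs([2, 1, 1, 3, 2, 5], 4) => [1, 3]
--     find_sum_pairs([1, 3, 5, 7, 9], 12) => [3, 9]
--     find_sum_pairs([2, 3, 1, 2, 3, 4, 5], 6) => [1, 5]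
--     """
--     pairs = []
--     for first in lst:
--         copy_list = lst.copy()
--         copy_list.remove(first)
--         for second in copy_list:
--             if first + second == target:
--                 pairs.append([first, second])
--
--     if pairs:
--         return sorted(sorted(pairs, key=lambda x: abs(x[0] - x[1]), reverse=True)[0])
--     else:
--         return []
-- ===== SOURCE B (Python) =====
-- def find_sum_pairs(lst: list, target: int) -> list:
--     # O(n): count occurrences once, then one pass picking the smallest value
--     # that has a partner; the max-|difference| pair is exactly [min, target-min].
--     counts = {}
--     for x in lst:
--         counts[x] = counts.get(x, 0) + 1
--     best = None
--     for a in lst: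
--         b = target - a
--         ok = counts.get(b, 0) >= (2 if a == b else 1)
--         if ok and (best is None or a < best):
--             best = a
--     if best is None:
--         return []
--     return [best, target - best]
-- ===== Notes on version B (the rewrite author's own statement) =====
-- stated objective: faster
-- what changed: Replaced the O(n^2) all-pairs enumeration plus a sort of the pair list by a single counting pass (hash map of value counts) and one linear scan picking the smallest value that has a summing partner; the max-|difference| pair is exactly [min, target-min].
import Mathlib
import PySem

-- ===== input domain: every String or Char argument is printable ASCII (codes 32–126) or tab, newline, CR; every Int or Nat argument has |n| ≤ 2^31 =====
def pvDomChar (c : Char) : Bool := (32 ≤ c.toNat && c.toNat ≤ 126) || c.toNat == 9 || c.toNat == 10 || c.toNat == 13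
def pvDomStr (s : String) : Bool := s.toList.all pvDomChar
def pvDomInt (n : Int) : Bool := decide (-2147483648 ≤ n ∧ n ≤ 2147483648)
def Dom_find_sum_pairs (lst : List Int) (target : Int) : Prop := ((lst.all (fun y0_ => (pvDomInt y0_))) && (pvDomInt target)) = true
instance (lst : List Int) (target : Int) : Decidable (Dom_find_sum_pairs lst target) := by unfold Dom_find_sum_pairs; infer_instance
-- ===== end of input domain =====

-- B replaces A's quadratic pair enumeration + sort of the pair list by a counting
-- hash map and one linear min-scan (the maximal-|difference| pair is [min valid, target - min valid]).


-- ===== PORT A =====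
-- Python's two-element list [first, second] is ported as the pair (first, second).
-- `copy_list.remove(first)` never raises (first is drawn from lst), so `.getD []` is exact there.
-- `if pairs: sorted(sorted(pairs, key=…, reverse=True)[0]) else []` is the final match
-- (the sorted list is empty exactly when pairs is).
def find_sum_pairs (lst : List Int) (target : Int) : List Int :=
  let pairs : List (Int × Int) :=
    lst.foldl (fun pairs first =>
      ((PySem.List.remove? lst first).getD []).foldl
        (fun pairs second =>
          if first + second = target then pairs ++ [(first, second)] else pairs)
        pairs) []
  match PySem.List.sorted pairs (fun p => |p.1 - p.2|) true with
  | [] => []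
  | p :: _ => PySem.List.sorted [p.1, p.2] id

-- ===== PORT B =====
def find_sum_pairs_alt (lst : List Int) (target : Int) : List Int :=
  let counts : PySem.Dict Int Int :=
    lst.foldl (fun d x => d.insert x (d.getD x 0 + 1)) PySem.Dict.empty
  let best : Option Int :=
    lst.foldl (fun best a =>
      if (decide ((if a = target - a then (2:Int) else 1) ≤ counts.getD (target - a) 0)
          && (match best with | none => true | some m => decide (a < m)))
      then some a else best) none
  match best with
  | none => []
  | some m => [m, target - m]

-- ===== PRECONDITION & SPEC =====
def Spec_find_sum_pairs (lst : List Int) (target : Int) (out : List Int) : Prop := out = find_sum_pairs_alt lst target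
instance (lst : List Int) (target : Int) (out : List Int) : Decidable (Spec_find_sum_pairs lst target out) := by unfold Spec_find_sum_pairs; infer_instance

-- ===== CLAIM (what is proved, stated in full; the proofs are below) =====
def Claim_equal_find_sum_pairs : Prop := ∀ (lst : List Int) (target : Int), Dom_find_sum_pairs lst target → Spec_find_sum_pairs lst target (find_sum_pairs lst target)

-- ===== LEMMAS AND PROOFS =====
def pvStep (p : Int → Bool) (best : Option Int) (a : Int) : Option Int :=
  if (p a && (match best with | none => true | some m => decide (a < m))) then some a else best

theorem pvStep_isSome (p : Int → Bool) (x : Int) (b0 : Option Int)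
    (h : b0 ≠ none ∨ p x = true) : ∃ m1, pvStep p b0 x = some m1 := by
  cases b0 with
  | none =>
    rcases h with h | h
    · exact absurd rfl h
    · exact ⟨x, by simp [pvStep, h]⟩
  | some m0 =>
    by_cases hc : (p x && decide (x < m0)) = true
    · exact ⟨x, by simp [pvStep, hc]⟩
    · exact ⟨m0, by simp [pvStep, hc]⟩

theorem pvStep_spec (p : Int → Bool) (x : Int) (b0 : Option Int) (m0 : Int)
    (h0 : pvStep p b0 x = some m0) :
    (b0 = some m0 ∨ (m0 = x ∧ p x = true))
    ∧ (p x = true → m0 ≤ x)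
    ∧ (∀ mi, b0 = some mi → m0 ≤ mi) := by
  cases b0 with
  | none =>
    simp only [pvStep, Bool.and_true] at h0
    split at h0
    · rename_i hpx
      have hx : m0 = x := by simpa using h0.symm
      subst hx
      exact ⟨Or.inr ⟨rfl, hpx⟩, fun _ => le_refl _, by simp⟩
    · exact absurd h0 (by simp)
  | some mi =>
    simp only [pvStep] at h0
    split at h0
    · rename_i hc
      simp only [Bool.and_eq_true, decide_eq_true_eq] at hc
      have hx : m0 = x := by simpa using h0.symm
      subst hx
      refine ⟨Or.inr ⟨rfl, hc.1⟩, fun _ => le_refl _, ?_⟩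
      intro mj hmj
      have : mi = mj := by simpa using hmj
      omega
    · rename_i hc
      have hm : mi = m0 := by simpa using h0
      subst hm
      refine ⟨Or.inl rfl, ?_, ?_⟩
      · intro hpx
        simp [hpx] at hc
        omega
      · intro mj hmj
        have : mi = mj := by simpa using hmj
        omega

theorem pvStep_none (p : Int → Bool) (x : Int) (b0 : Option Int)
    (h : pvStep p b0 x = none) : b0 = none ∧ p x = false := by
  cases b0 with
  | none =>
    simp only [pvStep, Bool.and_true] at h
    split at h
    · exact absurd h (by simp)
    · rename_i hpx
      exact ⟨rfl, by simpa using hpx⟩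
  | some mi =>
    simp only [pvStep] at h
    split at h
    · exact absurd h (by simp)
    · exact absurd h (by simp)

theorem pv_fold_spec (p : Int → Bool) : ∀ (l : List Int) (b0 : Option Int),
    (List.foldl (pvStep p) b0 l = none ↔ b0 = none ∧ ∀ a ∈ l, p a = false)
    ∧ (∀ m, List.foldl (pvStep p) b0 l = some m →
        (b0 = some m ∨ (m ∈ l ∧ p m = true))
        ∧ (∀ a ∈ l, p a = true → m ≤ a)
        ∧ (∀ m0, b0 = some m0 → m ≤ m0)) := by
  intro l
  induction l with
  | nil =>
    intro b0
    refine ⟨by simp, ?_⟩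
    intro m hm
    simp only [List.foldl_nil] at hm
    exact ⟨Or.inl hm, by simp, fun m0 h0 => by rw [hm] at h0; simp at h0; omega⟩
  | cons x xs ih =>
    intro b0
    simp only [List.foldl_cons]
    rcases ih (pvStep p b0 x) with ⟨ihn, ihs⟩
    constructor
    · rw [ihn]
      constructor
      · rintro ⟨h1, h2⟩
        rcases pvStep_none p x b0 h1 with ⟨hb0, hpx⟩
        exact ⟨hb0, fun a ha => by
          rcases List.mem_cons.mp ha with h | h
          · subst h; exact hpx
          · exact h2 a h⟩
      · rintro ⟨h0, hall⟩
        have hx := hall x (by simp)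
        refine ⟨?_, fun a ha => hall a (by simp [ha])⟩
        unfold pvStep
        simp [hx, h0]
    · intro m hm
      rcases ihs m hm with ⟨hsrc, hmin, hinit⟩
      refine ⟨?_, ?_, ?_⟩
      · rcases hsrc with h1 | h1
        · rcases (pvStep_spec p x b0 m h1).1 with h2 | h2
          · exact Or.inl h2
          · exact Or.inr ⟨by simp [h2.1], h2.1 ▸ h2.2⟩
        · exact Or.inr ⟨by simp [h1.1], h1.2⟩
      · intro a ha hpa
        rcases List.mem_cons.mp ha with h | h
        · subst h
          rcases pvStep_isSome p a b0 (Or.inr hpa) with ⟨m1, hm1⟩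
          exact le_trans (hinit m1 hm1) ((pvStep_spec p a b0 m1 hm1).2.1 hpa)
        · exact hmin a h hpa
      · intro m0 h0
        rcases pvStep_isSome p x b0 (Or.inl (by simp [h0])) with ⟨m1, hm1⟩
        exact le_trans (hinit m1 hm1) ((pvStep_spec p x b0 m1 hm1).2.2 m0 h0)

theorem pv_idxOf?_of_mem (a : Int) : ∀ (l : List Int), a ∈ l → l.idxOf? a = some (l.idxOf a) := by
  intro l
  induction l with
  | nil => simp
  | cons x xs ih =>
    intro h
    by_cases hx : x = a
    · subst hx; simp [List.idxOf?_cons]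
    · have hm : a ∈ xs := by
        rcases List.mem_cons.mp h with h1 | h1
        · exact absurd h1.symm hx
        · exact h1
      simp [List.idxOf?_cons, hx, ih hm]

theorem pv_rm_eq_erase (l : List Int) (a : Int) (h : a ∈ l) :
    (PySem.List.remove? l a).getD [] = l.erase a := by
  simp [PySem.List.remove?, pv_idxOf?_of_mem a l h]

theorem pv_counter_getD (v : Int) : ∀ (l : List Int) (d : PySem.Dict Int Int),
    (l.foldl (fun d x => d.insert x (d.getD x 0 + 1)) d).getD v 0
      = d.getD v 0 + (l.count v : Int) := by
  intro l
  induction l with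
  | nil => simp
  | cons x xs ih =>
    intro d
    simp only [List.foldl_cons, ih, PySem.Dict.getD_insert, List.count_cons]
    by_cases hv : v = x
    · subst hv; simp; ring
    · simp [hv, (by simpa [eq_comm] using hv : ¬ (x = v))]

def pvOk (lst : List Int) (target a : Int) : Bool :=
  decide ((if a = target - a then (2:Int) else 1) ≤ (lst.count (target - a) : Int))

def pvPairs (lst : List Int) (target : Int) : List (Int × Int) :=
  lst.foldl (fun pairs first =>
    ((PySem.List.remove? lst first).getD []).foldl
      (fun pairs second =>
        if first + second = target then pairs ++ [(first, second)] else pairs)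
      pairs) []

theorem pv_pairs_eq (lst : List Int) (target : Int) :
    pvPairs lst target
      = lst.flatMap (fun f =>
          (((PySem.List.remove? lst f).getD []).filter
            (fun s => decide (f + s = target))).map (fun s => (f, s))) := by
  unfold pvPairs
  have hfun : (fun (pairs : List (Int × Int)) (first : Int) =>
      ((PySem.List.remove? lst first).getD []).foldl
        (fun pairs second =>
          if first + second = target then pairs ++ [(first, second)] else pairs) pairs)
      = (fun pairs first => pairs ++
          (((PySem.List.remove? lst first).getD []).filter
            (fun s => decide (first + s = target))).map (fun s => (first, s))) := by
    funext pairs first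
    rw [← PySem.List.foldl_append_if (fun s => decide (first + s = target))
          (fun s => (first, s))]
    congr 1
    funext acc x
    simp
  rw [hfun, PySem.List.foldl_append_eq_flatMap]
  simp

theorem pv_mem_pairs (lst : List Int) (target : Int) (f s : Int) :
    (f, s) ∈ pvPairs lst target
      ↔ f ∈ lst ∧ s = target - f ∧ (target - f) ∈ lst.erase f := by
  rw [pv_pairs_eq]
  simp only [List.mem_flatMap, List.mem_map, List.mem_filter, decide_eq_true_eq]
  constructor
  · rintro ⟨f', hf', s', ⟨hs', hsum⟩, heq⟩
    injection heq with h1 h2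
    subst h1; subst h2
    refine ⟨hf', by omega, ?_⟩
    rw [pv_rm_eq_erase lst f' hf'] at hs'
    have h3 : target - f' = s' := by omega
    rwa [h3]
  · rintro ⟨hf, hs, hmem⟩
    refine ⟨f, hf, s, ⟨?_, by omega⟩, rfl⟩
    rw [pv_rm_eq_erase lst f hf]
    rwa [hs]

theorem pv_valid_iff (lst : List Int) (target a : Int) :
    (target - a) ∈ lst.erase a ↔ pvOk lst target a = true := by
  unfold pvOk
  rw [← List.count_pos_iff (l := lst.erase a), List.count_erase]
  simp only [beq_iff_eq, decide_eq_true_eq]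
  split_ifs with hc <;> omega

theorem pv_ok_symm (lst : List Int) (target a : Int) (ha : a ∈ lst)
    (h : pvOk lst target a = true) :
    (target - a) ∈ lst ∧ pvOk lst target (target - a) = true := by
  by_cases hc : a = target - a
  · rw [← hc]; exact ⟨ha, h⟩
  · unfold pvOk at h ⊢
    simp only [decide_eq_true_eq] at h ⊢
    rw [if_neg hc] at h
    have hmem : (target - a) ∈ lst := by
      rw [← List.count_pos_iff (l := lst)]; omega
    have ha' : 0 < lst.count a := List.count_pos_iff.mpr ha
    have h2 : target - (target - a) = a := by ring
    rw [h2, if_neg (by omega : ¬ (target - a = a))]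
    exact ⟨hmem, by omega⟩

theorem pv_sorted_pair (x y : Int) :
    PySem.List.sorted [x, y] id = if y < x then [y, x] else [x, y] := by
  simp [PySem.List.sorted, PySem.List.insertBy]


theorem pv_alt_eq (lst : List Int) (target : Int) :
    find_sum_pairs_alt lst target =
      (match List.foldl (pvStep (pvOk lst target)) none lst with
       | none => [] | some m => [m, target - m]) := by
  unfold find_sum_pairs_alt
  have hcnt : ∀ b, (lst.foldl (fun d x => d.insert x (d.getD x 0 + 1))
      PySem.Dict.empty).getD b 0 = (lst.count b : Int) := by
    intro b
    rw [pv_counter_getD]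
    simp [PySem.Dict.empty, PySem.Dict.getD, PySem.Dict.get?]
  have hfun : (fun (best : Option Int) (a : Int) =>
      if (decide ((if a = target - a then (2:Int) else 1) ≤
            (lst.foldl (fun d x => d.insert x (d.getD x 0 + 1)) PySem.Dict.empty).getD (target - a) 0)
          && (match best with | none => true | some m => decide (a < m)))
      then some a else best) = pvStep (pvOk lst target) := by
    funext best a
    unfold pvStep pvOk
    rw [hcnt (target - a)]
  simp only [hfun]

theorem pv_a_eq (lst : List Int) (target : Int) :
    find_sum_pairs lst target =
      (match PySem.List.sorted (pvPairs lst target) (fun p => |p.1 - p.2|) true with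
       | [] => []
       | p :: _ => PySem.List.sorted [p.1, p.2] id) := rfl

theorem pv_main (lst : List Int) (target : Int) :
    find_sum_pairs lst target = find_sum_pairs_alt lst target := by
  rw [pv_a_eq, pv_alt_eq]
  rcases hres : List.foldl (pvStep (pvOk lst target)) none lst with _ | m
  · -- no valid element
    have hall : ∀ a ∈ lst, pvOk lst target a = false :=
      ((pv_fold_spec (pvOk lst target) lst none).1.mp hres).2
    have hp : pvPairs lst target = [] := by
      rcases hne : pvPairs lst target with _ | ⟨⟨f, s⟩, rest⟩
      · rfl
      · exfalso
        have hmem : (f, s) ∈ pvPairs lst target := by rw [hne]; simp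
        rcases (pv_mem_pairs lst target f s).mp hmem with ⟨hf, _, hvf⟩
        have := (pv_valid_iff lst target f).mp hvf
        rw [hall f hf] at this
        exact absurd this (by simp)
    rw [hp]
    rfl
  · -- minimal valid element m
    rcases (pv_fold_spec (pvOk lst target) lst none).2 m hres with ⟨hsrc, hmin, _⟩
    rcases hsrc with h | ⟨hmem, hok⟩
    · exact absurd h (by simp)
    have hvm : (target - m) ∈ lst.erase m := (pv_valid_iff lst target m).mpr hok
    have hpair : (m, target - m) ∈ pvPairs lst target :=
      (pv_mem_pairs lst target m (target - m)).mpr ⟨hmem, rfl, hvm⟩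
    have hperm := PySem.List.sorted_perm (pvPairs lst target) (fun p => |p.1 - p.2|) true
    rcases hs : PySem.List.sorted (pvPairs lst target) (fun p => |p.1 - p.2|) true
      with _ | ⟨⟨u, v⟩, rest⟩
    · exfalso
      rw [hs] at hperm
      have := hperm.symm.mem_iff.mp hpair
      simp at this
    · rw [hs] at hperm
      have hpmem : (u, v) ∈ pvPairs lst target := hperm.mem_iff.mp (by simp)
      rcases (pv_mem_pairs lst target u v).mp hpmem with ⟨hu, hv, hvu⟩
      have hoku : pvOk lst target u = true := (pv_valid_iff lst target u).mp hvu
      have hkeymax : ∀ q ∈ pvPairs lst target, |q.1 - q.2| ≤ |u - v| := by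
        intro q hq
        have hq' : q ∈ (u, v) :: rest := hperm.mem_iff.mpr hq
        rcases List.mem_cons.mp hq' with h | h
        · rw [h]
        · have hpw := PySem.List.sorted_pairwise_rev (pvPairs lst target) (fun p => |p.1 - p.2|)
          rw [hs] at hpw
          exact (List.pairwise_cons.mp hpw).1 q h
      -- bounds
      have hmu : m ≤ u := hmin u hu hoku
      rcases pv_ok_symm lst target u hu hoku with ⟨hmemtu, hoktu⟩
      have hmtu : m ≤ target - u := hmin (target - u) hmemtu hoktu
      rcases pv_ok_symm lst target m hmem hok with ⟨hmemtm, hoktm⟩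
      have hmtm : m ≤ target - m := hmin (target - m) hmemtm hoktm
      have hkey := hkeymax (m, target - m) hpair
      simp only at hkey
      have hcase : u = m ∨ u = target - m := by
        rcases abs_cases (u - v) with ⟨h1, _⟩ | ⟨h1, _⟩ <;>
          rcases abs_cases (m - (target - m)) with ⟨h2, _⟩ | ⟨h2, _⟩ <;>
            omega
      show PySem.List.sorted [u, v] id = [m, target - m]
      rw [pv_sorted_pair]
      rcases hcase with hc | hc <;> split_ifs with hlt <;>
        simp only [List.cons.injEq, and_true] <;> omega

-- ===== VERDICT (by name: the statement is the Claim_ definition above) =====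
theorem find_sum_pairs_spec : Claim_equal_find_sum_pairs := by
  intro lst target _
  unfold Spec_find_sum_pairs
  exact pv_main lst target
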